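-- pv_equiv track=rewrite | github.com/Olga-koml/Algorithm | sprint_11/hands_sleight_task.py | hands_sleight
-- ===== SOURCE A (Python) =====
-- PLAYERS = 2
--
-- def hands_sleight(quantity_clicks: int, combinations: str) -> int:
--     result_clicks = []
--     for i in combinations:
--         if (
--             combinations.count(i) <= quantity_clicks*PLAYERS
--             and i not in result_clicks
--         ):
--             result_clicks.append(i)
--     return len(result_clicks)
-- ===== SOURCE B (Python) =====
-- PLAYERS = 2
--
-- def hands_sleight(quantity_clicks: int, combinations: str) -> int:
--     # Sort the string, then scan it once run by run: each run of equal
--     # characters is one distinct character; count runs whose length fits.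
--     limit = quantity_clicks * PLAYERS
--     rest = sorted(combinations)
--     total = 0
--     while rest:
--         c = rest[0]
--         run = 1
--         while run < len(rest) and rest[run] == c:
--             run += 1
--         if run <= limit:
--             total += 1
--         rest = rest[run:]
--     return total
-- ===== Notes on version B (the rewrite author's own statement) =====
-- stated objective: faster
-- what changed: Replaces A's per-character full-string .count scan with membership-list dedup by sorting the string once and scanning it run by run, counting the runs of equal characters whose length is within the limit.
import Mathlib
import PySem

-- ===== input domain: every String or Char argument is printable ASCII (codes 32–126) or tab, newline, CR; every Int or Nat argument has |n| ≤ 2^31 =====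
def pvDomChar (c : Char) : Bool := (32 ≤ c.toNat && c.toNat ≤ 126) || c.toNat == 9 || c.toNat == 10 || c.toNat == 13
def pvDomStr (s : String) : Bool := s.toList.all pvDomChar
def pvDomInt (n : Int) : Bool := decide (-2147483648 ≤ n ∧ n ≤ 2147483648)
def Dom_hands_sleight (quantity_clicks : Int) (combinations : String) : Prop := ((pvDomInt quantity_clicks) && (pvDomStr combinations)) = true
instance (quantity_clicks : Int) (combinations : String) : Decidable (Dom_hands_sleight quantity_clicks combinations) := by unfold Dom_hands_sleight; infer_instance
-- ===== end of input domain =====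

-- B sorts the string once and scans it run by run (one run = one distinct character),
-- instead of A's per-character full-string .count scan with a membership-list dedup (objective: faster).

-- ===== PORT A =====
-- 'combinations.count(i)' is PySem.Str.count with the one-character substring String.ofList [i]
def hands_sleight (quantity_clicks : Int) (combinations : String) : Int :=
  let result_clicks : List Char :=
    combinations.toList.foldl (fun acc i =>
      if (PySem.Str.count combinations (String.ofList [i]) : Int) ≤ quantity_clicks * 2 ∧ ¬ (i ∈ acc)
      then acc ++ [i] else acc) []
  (result_clicks.length : Int)

-- ===== PORT B =====
-- inner loop: 'while run < len(rest) and rest[run] == c: run += 1'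
def pvRunEnd (s : List Char) (c : Char) (run : Nat) : Nat :=
  if h : run < s.length then
    if s[run] = c then pvRunEnd s c (run + 1) else run
  else run
termination_by s.length - run

theorem pvRunEnd_ge (s : List Char) (c : Char) : ∀ run, run ≤ pvRunEnd s c run := by
  intro run
  induction hn : s.length - run using Nat.strong_induction_on generalizing run with
  | _ n ih =>
    unfold pvRunEnd
    split
    · split
      · have := ih (s.length - (run + 1)) (by omega) (run + 1) rfl; omega
      · exact le_refl _
    · exact le_refl _

-- outer loop: 'while rest: …; rest = rest[run:]'
def pvBLoop (limit : Int) (total : Int) (rest : List Char) : Int :=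
  match rest with
  | [] => total
  | c :: t =>
    let run := pvRunEnd (c :: t) c 1
    pvBLoop limit (if (run : Int) ≤ limit then total + 1 else total) ((c :: t).drop run)
termination_by rest.length
decreasing_by
  have h1 : 1 ≤ pvRunEnd (c :: t) c 1 := pvRunEnd_ge (c :: t) c 1
  simp [List.length_drop]; omega

def hands_sleight_alt (quantity_clicks : Int) (combinations : String) : Int :=
  let limit := quantity_clicks * 2
  let rest := PySem.List.sorted combinations.toList (fun x => x) false
  pvBLoop limit 0 rest

-- ===== PRECONDITION & SPEC =====
def Spec_hands_sleight (quantity_clicks : Int) (combinations : String) (out : Int) : Prop := out = hands_sleight_alt quantity_clicks combinations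
instance (quantity_clicks : Int) (combinations : String) (out : Int) : Decidable (Spec_hands_sleight quantity_clicks combinations out) := by unfold Spec_hands_sleight; infer_instance

-- ===== CLAIM (what is proved, stated in full; the proofs are below) =====
def Claim_equal_hands_sleight : Prop := ∀ (quantity_clicks : Int) (combinations : String), Dom_hands_sleight quantity_clicks combinations → Spec_hands_sleight quantity_clicks combinations (hands_sleight quantity_clicks combinations)

-- ===== LEMMAS AND PROOFS =====

-- Python's s.count(c) for a single character c is the character count.
theorem go_singleton (c : Char) : ∀ (s : List Char) (fuel acc : Nat), s.length ≤ fuel →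
    PySem.Chars.count.go [c] fuel s acc = acc + s.count c := by
  intro s
  induction s with
  | nil => intro fuel acc _; cases fuel <;> simp [PySem.Chars.count.go]
  | cons h t ih =>
    intro fuel acc hle
    cases fuel with
    | zero => simp at hle
    | succ n =>
      simp only [PySem.Chars.count.go]
      by_cases hc : c = h
      · subst hc
        rw [if_pos (by simp [List.isPrefixOf])]
        rw [show List.drop [c].length (c :: t) = t by simp]
        rw [ih n (acc+1) (by simpa using hle)]
        simp; omega
      · rw [if_neg (by simp [List.isPrefixOf]; omega)]
        rw [ih n acc (by simpa using hle)]
        have hne : h ≠ c := fun h' => hc h'.symm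
        simp [hne]

theorem count_singleton (s : List Char) (c : Char) :
    PySem.Chars.count s [c] = s.count c := by
  rw [show PySem.Chars.count s [c] = PySem.Chars.count.go [c] s.length s 0 by
    simp [PySem.Chars.count]]
  rw [go_singleton c s s.length 0 le_rfl]
  omega

-- A's accumulator loop: membership, for an arbitrary per-character predicate P.
theorem foldA_mem (P : Char → Prop) [DecidablePred P] :
    ∀ (xs acc : List Char) (c : Char),
      c ∈ xs.foldl (fun acc i => if P i ∧ ¬ (i ∈ acc) then acc ++ [i] else acc) acc ↔
      c ∈ acc ∨ (c ∈ xs ∧ P c) := by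
  intro xs
  induction xs with
  | nil => simp
  | cons x t ih =>
    intro acc c
    simp only [List.foldl_cons]
    by_cases hx : P x ∧ ¬ (x ∈ acc)
    · rw [if_pos hx, ih]
      simp only [List.mem_append, List.mem_cons, List.not_mem_nil, or_false]
      constructor
      · rintro ((h | rfl) | ⟨hm, hp⟩)
        · exact Or.inl h
        · exact Or.inr ⟨Or.inl rfl, hx.1⟩
        · exact Or.inr ⟨Or.inr hm, hp⟩
      · rintro (h | ⟨(rfl | hm), hp⟩)
        · exact Or.inl (Or.inl h)
        · exact Or.inl (Or.inr rfl)
        · exact Or.inr ⟨hm, hp⟩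
    · rw [if_neg hx, ih]
      constructor
      · rintro (h | ⟨hm, hp⟩)
        · exact Or.inl h
        · exact Or.inr ⟨List.mem_cons_of_mem _ hm, hp⟩
      · rintro (h | ⟨hm, hp⟩)
        · exact Or.inl h
        · rcases List.mem_cons.mp hm with rfl | hm'
          · rcases Classical.em (c ∈ acc) with h' | h'
            · exact Or.inl h'
            · exact absurd ⟨hp, h'⟩ hx
          · exact Or.inr ⟨hm', hp⟩

-- A's accumulator loop keeps its list without duplicates.
theorem foldA_nodup (P : Char → Prop) [DecidablePred P] :
    ∀ (xs acc : List Char), acc.Nodup →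
      (xs.foldl (fun acc i => if P i ∧ ¬ (i ∈ acc) then acc ++ [i] else acc) acc).Nodup := by
  intro xs
  induction xs with
  | nil => intro acc h; simpa
  | cons x t ih =>
    intro acc h
    simp only [List.foldl_cons]
    by_cases hx : P x ∧ ¬ (x ∈ acc)
    · rw [if_pos hx]
      refine ih _ ?_
      simp only [List.nodup_append, List.nodup_cons, List.not_mem_nil, not_false_iff,
        List.nodup_nil, and_true, true_and]
      refine ⟨h, ?_⟩
      intro a ha b
      simp only [List.mem_singleton]
      rintro rfl h'
      exact hx.2 (h' ▸ ha)
    · rw [if_neg hx]; exact ih _ h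

-- the canonical quantity both programs compute
def pvCard (L : Int) (zs : List Char) : Int :=
  ((zs.toFinset.filter (fun k => (zs.count k : Int) ≤ L)).card : Int)

-- the inner while loop computes start + length of the run of c from position `run`
theorem pvRunEnd_eq (s : List Char) (c : Char) : ∀ run, run ≤ s.length →
    pvRunEnd s c run = run + ((s.drop run).takeWhile (fun x => x == c)).length := by
  intro run
  induction hn : s.length - run using Nat.strong_induction_on generalizing run with
  | _ n ih =>
    intro hle
    unfold pvRunEnd
    split
    · rename_i h
      rw [List.drop_eq_getElem_cons h]
      split
      · rename_i heq
        rw [ih (s.length - (run + 1)) (by omega) (run + 1) rfl (by omega)]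
        simp [heq]
        omega
      · rename_i hne
        simp [hne]
    · rename_i h
      have : run = s.length := by omega
      simp [this, List.drop_length]

-- the first element of a dropWhile result falsifies the predicate
theorem dropWhile_head_false {p : Char → Bool} :
    ∀ (t : List Char) (h : Char) (tl : List Char), t.dropWhile p = h :: tl → p h = false := by
  intro t
  induction t with
  | nil => intro h tl hEq; simp [List.dropWhile] at hEq
  | cons x xs ih =>
    intro h tl hEq
    rw [List.dropWhile_cons] at hEq
    by_cases hp : p x = true
    · rw [if_pos hp] at hEq; exact ih h tl hEq
    · rw [if_neg hp] at hEq
      cases hEq; simpa using hp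

-- B's run scan on a sorted list counts the distinct characters whose multiplicity fits
theorem pvBLoop_sorted (L : Int) : ∀ (ys : List Char), ys.Pairwise (· ≤ ·) →
    ∀ (total : Int), pvBLoop L total ys = total + pvCard L ys := by
  intro ys
  induction hn : ys.length using Nat.strong_induction_on generalizing ys with
  | _ n ih =>
    intro hsorted total
    match ys with
    | [] => simp [pvBLoop, pvCard]
    | c :: t =>
      set tk := t.takeWhile (fun x => x == c) with htk
      set rs := t.dropWhile (fun x => x == c) with hrs
      have htkrs : tk ++ rs = t := List.takeWhile_append_dropWhile
      have htkc : ∀ x ∈ tk, x = c := by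
        intro x hx
        have := List.mem_takeWhile_imp hx
        simpa using this
      -- c does not occur in rs
      have hcrs : c ∉ rs := by
        intro hc
        obtain ⟨h, tl, hrseq⟩ := List.exists_cons_of_ne_nil (List.ne_nil_of_mem hc)
        have hf : (h == c) = false := dropWhile_head_false t h tl (by rw [← hrs, hrseq])
        have hhne : h ≠ c := by simpa using hf
        have hsubl : rs.Sublist t := by rw [hrs]; exact List.dropWhile_sublist _
        have hpt : t.Pairwise (· ≤ ·) := (List.pairwise_cons.mp hsorted).2
        have hprs : rs.Pairwise (· ≤ ·) := List.Pairwise.sublist hsubl hpt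
        have hch : c ≤ h := by
          have hht : h ∈ t := hsubl.mem (by rw [hrseq]; exact List.mem_cons_self)
          exact (List.pairwise_cons.mp hsorted).1 h hht
        rw [hrseq] at hc
        rcases List.mem_cons.mp hc with rfl | hc'
        · exact hhne rfl
        · have hhc : h ≤ c := (List.pairwise_cons.mp (hrseq ▸ hprs)).1 c hc'
          exact hhne (le_antisymm hhc hch)
      have hprs : rs.Pairwise (· ≤ ·) :=
        List.Pairwise.sublist (by rw [hrs]; exact List.dropWhile_sublist _)
          ((List.pairwise_cons.mp hsorted).2)
      -- the inner loop finds the end of the run of c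
      have hrun : pvRunEnd (c :: t) c 1 = 1 + tk.length := by
        rw [pvRunEnd_eq (c :: t) c 1 (by simp)]
        rw [show (c :: t).drop 1 = t from rfl, ← htk]
      -- dropping the run leaves rs
      have hdrop : (c :: t).drop (1 + tk.length) = rs := by
        rw [Nat.add_comm, List.drop_succ_cons, ← htkrs, List.drop_left]
      -- multiplicities
      have hcount_c : ((c :: t).count c : Int) = 1 + tk.length := by
        have : t.count c = tk.length := by
          rw [← htkrs, List.count_append]
          have h1 : tk.count c = tk.length := List.count_eq_length.mpr (fun x hx => ((htkc x hx) ▸ rfl))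
          have h2 : rs.count c = 0 := List.count_eq_zero.mpr hcrs
          omega
        simp [List.count_cons_self, this]; omega
      have hcount_ne : ∀ k, k ≠ c → (c :: t).count k = rs.count k := by
        intro k hk
        have htk0 : tk.count k = 0 := List.count_eq_zero.mpr (fun hm => hk (htkc k hm))
        rw [← htkrs]
        simp [List.count_append, htk0, Ne.symm hk]
      -- the distinct characters
      have hfin : (c :: t).toFinset = insert c rs.toFinset := by
        ext k
        simp only [List.mem_toFinset, Finset.mem_insert, List.mem_cons, ← htkrs,
          List.mem_append]
        constructor
        · rintro (rfl | hm | hm)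
          · exact Or.inl rfl
          · exact Or.inl (htkc k hm)
          · exact Or.inr (by simpa using hm)
        · rintro (rfl | hm)
          · exact Or.inl rfl
          · exact Or.inr (Or.inr (by simpa using hm))
      -- split the card
      have hcard : pvCard L (c :: t) =
          (if (1 + (tk.length : Int)) ≤ L then 1 else 0) + pvCard L rs := by
        unfold pvCard
        rw [hfin, Finset.filter_insert]
        have hfcong : rs.toFinset.filter (fun k => ((c :: t).count k : Int) ≤ L) =
            rs.toFinset.filter (fun k => (rs.count k : Int) ≤ L) := by
          apply Finset.filter_congr
          intro k hk
          have hkne : k ≠ c := fun h => hcrs (h ▸ List.mem_toFinset.mp hk)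
          rw [hcount_ne k hkne]
        by_cases hc : ((c :: t).count c : Int) ≤ L
        · rw [if_pos hc]
          rw [Finset.card_insert_of_notMem (by
            simp only [Finset.mem_filter, List.mem_toFinset]
            exact fun h => hcrs h.1)]
          rw [hfcong]
          rw [hcount_c] at hc
          rw [if_pos (by exact_mod_cast hc)]
          push_cast; ring
        · rw [if_neg hc, hfcong]
          rw [hcount_c] at hc
          rw [if_neg (by exact_mod_cast hc)]
          simp
      -- unfold one step of the loop
      rw [pvBLoop, hrun, hdrop]
      rw [ih rs.length (by
          have hsl : rs.Sublist t := by rw [hrs]; exact List.dropWhile_sublist _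
          have := hsl.length_le
          simp only [List.length_cons] at hn
          omega) rs rfl hprs]
      rw [hcard]
      push_cast
      split_ifs <;> ring

-- A's result is the same cardinality
theorem handsA_card (q : Int) (s : String) :
    hands_sleight q s = pvCard (q * 2) s.toList := by
  unfold hands_sleight
  set xs := s.toList with hxs
  set L := q * 2 with hL
  set P : Char → Prop := fun i => (PySem.Str.count s (String.ofList [i]) : Int) ≤ L with hP
  have hPiff : ∀ c, P c ↔ (xs.count c : Int) ≤ L := by
    intro c
    have : PySem.Str.count s (String.ofList [c]) = xs.count c := by
      simp [PySem.Str.count, count_singleton, hxs]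
    rw [hP]; simp only; rw [this]
  set R := xs.foldl (fun acc i => if P i ∧ ¬ (i ∈ acc) then acc ++ [i] else acc) [] with hR
  have hnod : R.Nodup := foldA_nodup P xs [] List.nodup_nil
  have hfin : R.toFinset = xs.toFinset.filter (fun k => (xs.count k : Int) ≤ L) := by
    ext k
    simp only [List.mem_toFinset, Finset.mem_filter, hR]
    rw [foldA_mem P xs [] k]
    simp only [List.not_mem_nil, false_or]
    rw [hPiff k]
  have hlen : R.length = R.toFinset.card := (List.toFinset_card_of_nodup hnod).symm
  show ((R.length : Int)) = pvCard L xs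
  rw [hlen, hfin]
  rfl

-- ===== VERDICT (by name: the statement is the Claim_ definition above) =====
theorem hands_sleight_spec : Claim_equal_hands_sleight := by
  intro q s _
  show hands_sleight q s = hands_sleight_alt q s
  rw [handsA_card]
  unfold hands_sleight_alt
  set ys := PySem.List.sorted s.toList (fun x => x) false with hys
  have hperm : ys.Perm s.toList := by rw [hys]; exact PySem.List.sorted_perm _ _ _
  have hpair : ys.Pairwise (· ≤ ·) := by
    have := PySem.List.sorted_pairwise (xs := s.toList) (key := fun x : Char => x)
    simpa using this
  rw [pvBLoop_sorted (q * 2) ys hpair 0]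
  unfold pvCard
  have hfs : ys.toFinset = s.toList.toFinset := by
    ext k; simp [List.mem_toFinset, hperm.mem_iff]
  rw [hfs]
  simp only [hperm.count_eq]
  ring
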